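-- pv_equiv track=rewrite | github.com/EuphratesG/FedE | dataloader.py | find_common_entities
-- ===== SOURCE A (Python) =====
-- def find_common_entities(client_entities):
--     common_entities = {}
--     clients = list(client_entities.keys())
--     for i in range(len(clients)):
--         for j in range(i + 1, len(clients)):
--             client1 = clients[i]
--             client2 = clients[j]
--             common = client_entities[client1].intersection(client_entities[client2])
--             common_entities[(client1, client2)] = common
--     return common_entities
-- ===== SOURCE B (Python) =====
-- def find_common_entities(client_entities):
--     items = list(client_entities.items())
--     # inverted index: entity -> list of client positions owning it
--     owners = {}
--     for i, (client, entities) in enumerate(items):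
--         for e in entities:
--             owners.setdefault(e, []).append(i)
--     # pre-initialize every pair (i < j) with an empty set, in A's key order
--     common_entities = {}
--     for i in range(len(items)):
--         for j in range(i + 1, len(items)):
--             common_entities[(items[i][0], items[j][0])] = set()
--     # one pass over the owned entities: each entity joins every pair of its owners
--     for i, (client, entities) in enumerate(items):
--         for e in entities:
--             for j in owners[e]:
--                 if i < j:
--                     common_entities[(client, items[j][0])].add(e)
--     return common_entities
-- ===== Notes on version B (the rewrite author's own statement) =====
-- stated objective: alternative
-- what changed: Replaces the per-pair set.intersection calls with an inverted index (entity -> owning client positions) built in one pass; result pairs are pre-initialized empty in A's key order and each entity adds itself to the set of every ordered pair of its owners.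
import Mathlib
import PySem

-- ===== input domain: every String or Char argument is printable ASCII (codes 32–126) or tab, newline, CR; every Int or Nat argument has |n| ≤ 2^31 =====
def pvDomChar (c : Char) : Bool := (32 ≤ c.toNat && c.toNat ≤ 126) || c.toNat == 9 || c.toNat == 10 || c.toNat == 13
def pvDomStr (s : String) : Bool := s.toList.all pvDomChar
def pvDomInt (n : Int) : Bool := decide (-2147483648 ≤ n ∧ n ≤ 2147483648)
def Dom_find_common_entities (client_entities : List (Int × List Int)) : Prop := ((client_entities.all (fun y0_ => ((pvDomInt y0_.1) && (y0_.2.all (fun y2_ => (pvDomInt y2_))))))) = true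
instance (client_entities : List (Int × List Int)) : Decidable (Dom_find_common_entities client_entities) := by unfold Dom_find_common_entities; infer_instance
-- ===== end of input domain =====

-- B replaces the quadratic per-pair set intersections by an inverted index
-- entity → owning-client positions; each entity then adds itself to every owner pair.

-- ===== PORT A =====
def find_common_entities (client_entities : List (Int × List Int)) : List (Int × Int × List Int) :=
  -- the dict argument (association list → Python dict: later duplicate keys overwrite)
  let d : PySem.Dict Int (List Int) := PySem.Dict.ofList client_entities
  let clients := d.keys
  let res : PySem.Dict (Int × Int) (List Int) :=
    (PySem.List.pyRange 0 (clients.length : Int)).foldl (fun acc i =>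
      (PySem.List.pyRange (i + 1) (clients.length : Int)).foldl (fun acc j =>
        let client1 := PySem.List.pyGetD clients i 0
        let client2 := PySem.List.pyGetD clients j 0
        let common := PySem.Set.inter (d.getD client1 []) (d.getD client2 [])
        acc.insert (client1, client2) common) acc)
      PySem.Dict.empty
  res.items.map (fun p => (p.1.1, p.1.2, p.2))

-- ===== PORT B =====
def find_common_entities_alt (client_entities : List (Int × List Int)) : List (Int × Int × List Int) :=
  let items := (PySem.Dict.ofList client_entities).items
  -- inverted index: entity -> list of owning client positions
  let owners : PySem.Dict Int (List Int) :=
    (PySem.List.enumerate items).foldl (fun ow p =>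
      p.2.2.foldl (fun ow e => ow.modify e [] (fun l => l ++ [p.1])) ow)
      PySem.Dict.empty
  -- pre-initialize every pair (i < j) with an empty set
  let init : PySem.Dict (Int × Int) (List Int) :=
    (PySem.List.pyRange 0 (items.length : Int)).foldl (fun acc i =>
      (PySem.List.pyRange (i + 1) (items.length : Int)).foldl (fun acc j =>
        acc.insert ((PySem.List.pyGetD items i (0, [])).1, (PySem.List.pyGetD items j (0, [])).1) []) acc)
      PySem.Dict.empty
  -- one pass: each entity joins every pair of its owners
  let res : PySem.Dict (Int × Int) (List Int) :=
    (PySem.List.enumerate items).foldl (fun acc p =>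
      p.2.2.foldl (fun acc e =>
        (owners.getD e []).foldl (fun acc j =>
          if p.1 < j then
            acc.modify (p.2.1, (PySem.List.pyGetD items j (0, [])).1) [] (fun s => PySem.Set.add s e)
          else acc) acc) acc) init
  res.items.map (fun p => (p.1.1, p.1.2, p.2))

-- ===== PRECONDITION & SPEC =====
-- The value lists encode Python sets (distinct elements); Pre_ excludes lists with a
-- duplicated entity inside a value list, which do not represent any Python input.
def Pre_find_common_entities (client_entities : List (Int × List Int)) : Prop :=
  ∀ p ∈ client_entities, p.2.Nodup
instance (client_entities : List (Int × List Int)) : Decidable (Pre_find_common_entities client_entities) := by unfold Pre_find_common_entities; infer_instance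

def pvWitness_find_common_entities : (List (Int × List Int)) := [(0, [1, 2]), (1, [2, 3]), (2, [])]

def Spec_find_common_entities (client_entities : List (Int × List Int)) (out : List (Int × Int × List Int)) : Prop := out = find_common_entities_alt client_entities
instance (client_entities : List (Int × List Int)) (out : List (Int × Int × List Int)) : Decidable (Spec_find_common_entities client_entities out) := by unfold Spec_find_common_entities; infer_instance

-- ===== CLAIM (what is proved, stated in full; the proofs are below) =====
def Claim_equal_find_common_entities : Prop := ∀ (client_entities : List (Int × List Int)), Dom_find_common_entities client_entities → Pre_find_common_entities client_entities → Spec_find_common_entities client_entities (find_common_entities client_entities)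

-- ===== LEMMAS AND PROOFS =====

-- a nested for-loop is a fold over the flattened list of loop-variable pairs
theorem pv_foldl_flatten {α β γ : Type} (l : List α) (g : α → List β) (step : γ → α → β → γ) (init : γ) :
    l.foldl (fun acc x => (g x).foldl (fun a y => step a x y) acc) init
      = (l.flatMap (fun x => (g x).map (fun y => (x, y)))).foldl (fun a p => step a p.1 p.2) init := by
  induction l generalizing init with
  | nil => rfl
  | cons x t ih => simp [List.flatMap_cons, List.foldl_append, List.foldl_map, ih]

theorem pv_filter_flatMap {α β : Type} (l : List α) (g : α → List β) (q : β → Bool) :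
    (l.flatMap g).filter q = l.flatMap (fun x => (g x).filter q) := by
  induction l with
  | nil => rfl
  | cons x t ih => simp [List.flatMap_cons, List.filter_append, ih]

-- a flatMap all of whose pieces but one are empty is that one piece
theorem pv_flatMap_single {α β : Type} {l : List α} {g : α → List β} {x : α}
    (hx : x ∈ l) (hnd : l.Nodup) (h0 : ∀ y ∈ l, y ≠ x → g y = []) : l.flatMap g = g x := by
  induction l with
  | nil => cases hx
  | cons a t ih =>
    rcases List.mem_cons.mp hx with h | h
    · subst h
      have : t.flatMap g = [] := List.flatMap_eq_nil_iff.mpr (fun y hy =>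
        h0 y (List.mem_cons_of_mem _ hy) (fun he => (List.nodup_cons.mp hnd).1 (he ▸ hy)))
      simp [List.flatMap_cons, this]
    · have ha : g a = [] := h0 a List.mem_cons_self (fun he => (List.nodup_cons.mp hnd).1 (he ▸ h))
      simp [List.flatMap_cons, ha, ih h (List.nodup_cons.mp hnd).2
        (fun y hy => h0 y (List.mem_cons_of_mem _ hy))]

-- a fold of set-adds at computed keys, read back at one key
theorem pv_getD_foldl_modify_add {β : Type} (M : List β) (key : β → Int × Int) (val : β → Int)
    (dd : PySem.Dict (Int × Int) (List Int)) (k0 : Int × Int) :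
    (M.foldl (fun d r => d.modify (key r) [] (fun s => PySem.Set.add s (val r))) dd).getD k0 []
      = ((M.filter (fun r => key r == k0)).map val).foldl PySem.Set.add (dd.getD k0 []) := by
  induction M generalizing dd with
  | nil => rfl
  | cons r t ih =>
    simp only [List.foldl_cons, List.filter_cons]
    by_cases h : key r = k0
    · simp [h, ih]
    · have hb : (key r == k0) = false := by simpa using h
      have hne : ¬ (k0 = key r) := fun h' => h h'.symm
      simp only [hb, PySem.Dict.getD_modify, if_neg hne, Bool.false_eq_true, ite_false, ih]

theorem pv_flatMap_if {α β : Type} (l : List α) (p : α → Prop) [DecidablePred p] (g : α → β) :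
    l.flatMap (fun e => if p e then [g e] else []) = (l.filter (fun e => decide (p e))).map g := by
  induction l with
  | nil => rfl
  | cons a t ih =>
    by_cases h : p a <;> simp [List.flatMap_cons, h, ih]

theorem pv_filter_nodup_single {l : List Int} {x : Int} (hnd : l.Nodup) :
    l.filter (fun y => y == x) = if x ∈ l then [x] else [] := by
  by_cases h : x ∈ l
  · simp [h, List.filter_beq, List.count_eq_one_of_mem hnd h]
  · simp [h, List.filter_beq, List.count_eq_zero_of_not_mem h]

-- every item of the dict built from an association list is one of its pairs
theorem pv_mem_items_foldl_insert {κ ν : Type} [BEq κ] [LawfulBEq κ] (l : List (κ × ν))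
    (d : PySem.Dict κ ν) (p : κ × ν)
    (h : p ∈ (l.foldl (fun acc q => acc.insert q.1 q.2) d).items) : p ∈ d.items ∨ p ∈ l := by
  induction l generalizing d with
  | nil => exact Or.inl h
  | cons q t ih =>
    rcases ih _ (by simpa using h) with h' | h'
    · rcases (PySem.Dict.mem_items_insert _ _ _ _).mp h' with h'' | h''
      · exact Or.inr (by simp [h''])
      · exact Or.inl h''.1
    · exact Or.inr (List.mem_cons_of_mem _ h')

theorem pv_mem_items_ofList {κ ν : Type} [BEq κ] [LawfulBEq κ] {l : List (κ × ν)} {p : κ × ν}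
    (h : p ∈ (PySem.Dict.ofList l).items) : p ∈ l := by
  have := pv_mem_items_foldl_insert l PySem.Dict.empty p
    (by simpa [PySem.Dict.ofList, PySem.Dict.update] using h)
  rcases this with h' | h'
  · simp [PySem.Dict.empty] at h'
  · exact h'

theorem pv_key_fst_inj {items : List (Int × List Int)} (hnd : (items.map (·.1)).Nodup)
    {a b : Int} (ha0 : 0 ≤ a) (han : a < (items.length : Int)) (hb0 : 0 ≤ b) (hbn : b < (items.length : Int))
    (h : (PySem.List.pyGetD items a (0, [])).1 = (PySem.List.pyGetD items b (0, [])).1) : a = b := by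
  rw [PySem.List.pyGetD_eq_getElem items _ ha0 han, PySem.List.pyGetD_eq_getElem items _ hb0 hbn] at h
  have h1 : a.toNat < items.length := by omega
  have h2 : b.toNat < items.length := by omega
  have : (items.map (·.1))[a.toNat]'(by simpa using h1) = (items.map (·.1))[b.toNat]'(by simpa using h2) := by
    simpa using h
  have := (hnd.getElem_inj_iff).mp this
  omega

-- proof-side abbreviations: the flattened pair-index list, the pair key and pair value
def pvP (n : Nat) : List (Int × Int) :=
  (PySem.List.pyRange 0 (n : Int)).flatMap (fun i => (PySem.List.pyRange (i + 1) (n : Int)).map (fun j => (i, j)))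

def pvKey (items : List (Int × List Int)) (q : Int × Int) : Int × Int :=
  ((PySem.List.pyGetD items q.1 (0, [])).1, (PySem.List.pyGetD items q.2 (0, [])).1)

def pvVal (items : List (Int × List Int)) (q : Int × Int) : List Int :=
  PySem.Set.inter (PySem.List.pyGetD items q.1 (0, [])).2 (PySem.List.pyGetD items q.2 (0, [])).2

theorem pv_mem_pvP {n : Nat} {q : Int × Int} : q ∈ pvP n ↔ 0 ≤ q.1 ∧ q.1 < q.2 ∧ q.2 < (n : Int) := by
  unfold pvP
  simp only [List.mem_flatMap, List.mem_map, PySem.List.mem_pyRange_one]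
  constructor
  · rintro ⟨i, ⟨hi0, hin⟩, j, ⟨hj0, hjn⟩, rfl⟩; exact ⟨hi0, by omega, hjn⟩
  · rintro ⟨h0, h1, h2⟩; exact ⟨q.1, ⟨h0, by omega⟩, q.2, ⟨by omega, h2⟩, rfl⟩

theorem pv_nodup_map_key {items : List (Int × List Int)} (hnd : (items.map (·.1)).Nodup) :
    ((pvP items.length).map (pvKey items)).Nodup := by
  unfold pvP
  rw [List.map_flatMap]
  rw [List.nodup_flatMap]
  constructor
  · intro i hi
    rw [PySem.List.mem_pyRange_one] at hi
    rw [List.map_map]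
    refine List.Nodup.map_on ?_ (PySem.List.nodup_pyRange_one _ _)
    intro j1 hj1 j2 hj2 he
    rw [PySem.List.mem_pyRange_one] at hj1 hj2
    have h2 : (PySem.List.pyGetD items j1 (0, [])).1 = (PySem.List.pyGetD items j2 (0, [])).1 :=
      congrArg Prod.snd (he : pvKey items (i, j1) = pvKey items (i, j2))
    exact pv_key_fst_inj hnd (by omega) (by omega) (by omega) (by omega) h2
  · rw [List.pairwise_iff_getElem]
    intro a b ha hb hab
    rw [PySem.List.length_pyRange_one] at ha hb
    rw [PySem.List.getElem_pyRange_one _ _ _ (by rw [PySem.List.length_pyRange_one]; omega),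
        PySem.List.getElem_pyRange_one _ _ _ (by rw [PySem.List.length_pyRange_one]; omega)]
    intro x hx1 hx2
    rw [List.mem_map] at hx1 hx2
    obtain ⟨q1, hq1, rfl⟩ := hx1
    obtain ⟨q2, hq2, he⟩ := hx2
    rw [List.mem_map] at hq1 hq2
    obtain ⟨j1, hj1, rfl⟩ := hq1
    obtain ⟨j2, hj2, rfl⟩ := hq2
    rw [PySem.List.mem_pyRange_one] at hj1 hj2
    have h1 : (PySem.List.pyGetD items (0 + (b:Int)) (0, [])).1
        = (PySem.List.pyGetD items (0 + (a:Int)) (0, [])).1 := by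
      have := congrArg Prod.fst he; simpa [pvKey] using this
    have := pv_key_fst_inj hnd (a := 0 + (b:Int)) (b := 0 + (a:Int))
      (by omega) (by omega) (by omega) (by omega) h1
    omega

theorem pv_getD_key (d : PySem.Dict Int (List Int)) (hnd : d.keys.Nodup) {a : Int}
    (ha0 : 0 ≤ a) (han : a < (d.items.length : Int)) :
    PySem.List.pyGetD d.keys a 0 = (PySem.List.pyGetD d.items a (0, [])).1 ∧
    d.getD (PySem.List.pyGetD d.keys a 0) [] = (PySem.List.pyGetD d.items a (0, [])).2 := by
  have h1 : a.toNat < d.items.length := by omega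
  have hkl : (d.keys.length : Int) = (d.items.length : Int) := by simp [PySem.Dict.keys]
  rw [PySem.List.pyGetD_eq_getElem _ _ ha0 (by omega), PySem.List.pyGetD_eq_getElem _ _ ha0 han]
  have hk : d.keys[a.toNat]'(by simp [PySem.Dict.keys]; omega) = (d.items[a.toNat]'h1).1 := by
    simp [PySem.Dict.keys]
  refine ⟨hk, ?_⟩
  rw [hk]
  have hmem : ((d.items[a.toNat]'h1).1, (d.items[a.toNat]'h1).2) ∈ d.items := by
    exact List.getElem_mem h1
  exact PySem.Dict.getD_of_mem_items d hmem hnd []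

-- A's nested insert loop produces exactly the pair list with intersection values
theorem pv_A_items (d : PySem.Dict Int (List Int)) (hnd : d.keys.Nodup) :
    ((PySem.List.pyRange 0 (d.keys.length : Int)).foldl (fun acc i =>
      (PySem.List.pyRange (i + 1) (d.keys.length : Int)).foldl (fun acc j =>
        acc.insert (PySem.List.pyGetD d.keys i 0, PySem.List.pyGetD d.keys j 0)
          (PySem.Set.inter (d.getD (PySem.List.pyGetD d.keys i 0) [])
            (d.getD (PySem.List.pyGetD d.keys j 0) []))) acc)
      (PySem.Dict.empty : PySem.Dict (Int × Int) (List Int))).items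
    = (pvP d.items.length).map (fun q => (pvKey d.items q, pvVal d.items q)) := by
  have hlen : (d.keys.length : Int) = (d.items.length : Int) := by simp [PySem.Dict.keys]
  rw [hlen]
  rw [pv_foldl_flatten (PySem.List.pyRange 0 (d.items.length : Int))
      (fun i => PySem.List.pyRange (i + 1) (d.items.length : Int))
      (fun (acc : PySem.Dict (Int × Int) (List Int)) i j =>
        acc.insert (PySem.List.pyGetD d.keys i 0, PySem.List.pyGetD d.keys j 0)
          (PySem.Set.inter (d.getD (PySem.List.pyGetD d.keys i 0) [])
            (d.getD (PySem.List.pyGetD d.keys j 0) []))) PySem.Dict.empty]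
  have hFM : (PySem.List.pyRange 0 (d.items.length : Int)).flatMap
      (fun i => (PySem.List.pyRange (i + 1) (d.items.length : Int)).map (fun j => (i, j)))
      = pvP d.items.length := rfl
  rw [hFM]
  have hnd' : (d.items.map (·.1)).Nodup := by simpa [PySem.Dict.keys] using hnd
  have hptwise : ∀ q ∈ pvP d.items.length,
      ((PySem.List.pyGetD d.keys q.1 0, PySem.List.pyGetD d.keys q.2 0) : Int × Int)
        = pvKey d.items q ∧
      PySem.Set.inter (d.getD (PySem.List.pyGetD d.keys q.1 0) [])
          (d.getD (PySem.List.pyGetD d.keys q.2 0) []) = pvVal d.items q := by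
    intro q hq
    obtain ⟨h0, h1, h2⟩ := pv_mem_pvP.mp hq
    obtain ⟨hk1, hv1⟩ := pv_getD_key d hnd h0 (by omega)
    obtain ⟨hk2, hv2⟩ := pv_getD_key d hnd (a := q.2) (by omega) h2
    exact ⟨by rw [hk1, hk2]; rfl, by rw [hv1, hv2]; rfl⟩
  have hmapk : (pvP d.items.length).map
      (fun q => ((PySem.List.pyGetD d.keys q.1 0, PySem.List.pyGetD d.keys q.2 0) : Int × Int))
      = (pvP d.items.length).map (pvKey d.items) :=
    List.map_congr_left (fun q hq => (hptwise q hq).1)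
  rw [PySem.Dict.items_foldl_insert_fresh (pvP d.items.length)
      (fun q => ((PySem.List.pyGetD d.keys q.1 0, PySem.List.pyGetD d.keys q.2 0) : Int × Int))
      (fun q => PySem.Set.inter (d.getD (PySem.List.pyGetD d.keys q.1 0) [])
        (d.getD (PySem.List.pyGetD d.keys q.2 0) []))
      PySem.Dict.empty (fun a _ => PySem.Dict.contains_empty _)
      (by rw [hmapk]; exact pv_nodup_map_key hnd')]
  have : (PySem.Dict.empty : PySem.Dict (Int × Int) (List Int)).items = [] := rfl
  rw [this, List.nil_append]
  exact List.map_congr_left (fun q hq => by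
    rw [Prod.ext_iff]
    exact ⟨(hptwise q hq).1, (hptwise q hq).2⟩)

-- the inverted index read back at one entity: the positions of the owning clients
theorem pv_owners_getD (items : List (Int × List Int)) (hvals : ∀ p ∈ items, p.2.Nodup) (e : Int) :
    ((List.foldl (fun ow (p : Int × Int × List Int) =>
        List.foldl (fun (ow : PySem.Dict Int (List Int)) e =>
          ow.modify e [] (fun l => l ++ [p.1])) ow p.2.2)
        PySem.Dict.empty (PySem.List.enumerate items)).getD e [])
    = (PySem.List.enumerate items).flatMap (fun p => if e ∈ p.2.2 then [p.1] else []) := by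
  rw [pv_foldl_flatten (PySem.List.enumerate items) (fun p => p.2.2)
      (fun (ow : PySem.Dict Int (List Int)) (p : Int × Int × List Int) e =>
        ow.modify e [] (fun l => l ++ [p.1])) PySem.Dict.empty]
  have hmap := List.foldl_map (f := fun (q : (Int × Int × List Int) × Int) => (q.2, q.1.1))
    (g := fun (d : PySem.Dict Int (List Int)) (p : Int × Int) => d.modify p.1 [] (fun l => l ++ [p.2]))
    (l := (PySem.List.enumerate items).flatMap (fun x => x.2.2.map (fun y => (x, y))))
    (init := (PySem.Dict.empty : PySem.Dict Int (List Int)))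
  simp only [] at hmap
  rw [← hmap, PySem.Dict.getD_foldl_modify_append, PySem.Dict.getD_empty, List.nil_append]
  simp only [List.map_flatMap, List.map_map, pv_filter_flatMap, List.filter_map,
    List.map_map, Function.comp_def]
  rw [List.flatMap_def, List.flatMap_def]
  refine congrArg List.flatten (List.map_congr_left ?_)
  intro p hp
  obtain ⟨k, hk, rfl⟩ := (PySem.List.mem_enumerate_iff items 0 p).mp hp
  have hnodup : (items[k]).2.Nodup := hvals _ (List.getElem_mem hk)
  simp only []
  rw [pv_filter_nodup_single hnodup]
  by_cases he : e ∈ (items[k]).2 <;> simp [he]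

-- membership in the owner list
theorem pv_mem_owners (items : List (Int × List Int)) (e j : Int) :
    j ∈ (PySem.List.enumerate items).flatMap (fun p => if e ∈ p.2.2 then [p.1] else [])
      ↔ ∃ k : Nat, ∃ _ : k < items.length, j = (k : Int) ∧ e ∈ (items[k]).2 := by
  simp only [List.mem_flatMap]
  constructor
  · rintro ⟨p, hp, hj⟩
    obtain ⟨k, hk, rfl⟩ := (PySem.List.mem_enumerate_iff items 0 p).mp hp
    by_cases he : e ∈ (items[k]).2
    · simp only [he, if_pos] at hj
      simp only [List.mem_singleton] at hj
      exact ⟨k, hk, by simpa using hj, he⟩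
    · simp [he] at hj
  · rintro ⟨k, hk, rfl, he⟩
    refine ⟨((k : Int), items[k]), ?_, ?_⟩
    · exact (PySem.List.mem_enumerate_iff items 0 _).mpr ⟨k, hk, by simp⟩
    · simp [he]

theorem pv_nodup_enumerate (items : List (Int × List Int)) :
    (PySem.List.enumerate items).Nodup := by
  refine List.Nodup.of_map (fun p => p.1) ?_
  rw [PySem.List.map_fst_enumerate]
  exact PySem.List.nodup_pyRange_one _ _

theorem pv_nodup_owners (items : List (Int × List Int)) (e : Int) :
    ((PySem.List.enumerate items).flatMap (fun p => if e ∈ p.2.2 then [p.1] else [])).Nodup := by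
  rw [List.nodup_flatMap]
  refine ⟨fun p _ => by split <;> simp, ?_⟩
  refine (PySem.List.pairwise_lt_enumerate items 0).imp ?_
  intro p q hlt a ha hb
  have h1 : a = p.1 := by by_cases h : e ∈ p.2.2 <;> simp [h] at ha; omega
  have h2 : a = q.1 := by by_cases h : e ∈ q.2.2 <;> simp [h] at hb; omega
  omega

-- B's pre-initialized dict
theorem pv_init_items (items : List (Int × List Int)) (hnd' : (items.map (·.1)).Nodup) :
    (List.foldl
      (fun acc i =>
        List.foldl
          (fun (acc : PySem.Dict (Int × Int) (List Int)) j =>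
            acc.insert ((PySem.List.pyGetD items i (0, [])).1,
              (PySem.List.pyGetD items j (0, [])).1) [])
          acc (PySem.List.pyRange (i + 1) (items.length : Int)))
      PySem.Dict.empty (PySem.List.pyRange 0 (items.length : Int))).items
    = (pvP items.length).map (fun q => (pvKey items q, ([] : List Int))) := by
  have hFM : (PySem.List.pyRange 0 (items.length : Int)).flatMap
      (fun i => (PySem.List.pyRange (i + 1) (items.length : Int)).map (fun j => (i, j)))
      = pvP items.length := rfl
  rw [pv_foldl_flatten (PySem.List.pyRange 0 (items.length : Int))
      (fun i => PySem.List.pyRange (i + 1) (items.length : Int))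
      (fun (acc : PySem.Dict (Int × Int) (List Int)) i j =>
        acc.insert ((PySem.List.pyGetD items i (0, [])).1,
          (PySem.List.pyGetD items j (0, [])).1) []) PySem.Dict.empty]
  rw [hFM]
  rw [PySem.Dict.items_foldl_insert_fresh (pvP items.length)
      (fun q => ((PySem.List.pyGetD items q.1 (0, [])).1, (PySem.List.pyGetD items q.2 (0, [])).1))
      (fun _ => ([] : List Int)) PySem.Dict.empty (fun a _ => PySem.Dict.contains_empty _)
      (pv_nodup_map_key hnd')]
  rfl

-- filtering the flattened loop at one pair key leaves that pair's intersection, in order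
theorem pv_M_filter (items : List (Int × List Int)) (hnd' : (items.map (·.1)).Nodup)
    {a b : Nat} (hab : a < b) (hbn : b < items.length) :
    (List.filter (fun (r : ((Int × Int × List Int) × Int) × Int) =>
        ((r.1.1.2.1, (PySem.List.pyGetD items r.2 (0, [])).1) : Int × Int)
          == pvKey items ((a : Int), (b : Int)))
      (List.filter (fun (r : ((Int × Int × List Int) × Int) × Int) => decide (r.1.1.1 < r.2))
        (((PySem.List.enumerate items).flatMap (fun p => p.2.2.map (fun e => (p, e)))).flatMap
          (fun q => ((PySem.List.enumerate items).flatMap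
              (fun p' => if q.2 ∈ p'.2.2 then [p'.1] else [])).map (fun j => (q, j)))))).map (fun r => r.1.2)
    = (items[a]'(by omega)).2.filter (fun e => decide (e ∈ (items[b]'hbn).2)) := by
  have han : a < items.length := by omega
  have hKa : pvKey items ((a : Int), (b : Int)) = ((items[a]'han).1, (items[b]'hbn).1) := by
    unfold pvKey
    rw [PySem.List.pyGetD_eq_getElem _ _ (by omega) (by push_cast; omega),
        PySem.List.pyGetD_eq_getElem _ _ (by omega) (by push_cast; omega)]
    simp
  rw [hKa, List.filter_filter, pv_filter_flatMap, List.flatMap_assoc]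
  simp only [List.flatMap_map]
  have hx : ((0 : Int) + (a : Int), items[a]'han) ∈ PySem.List.enumerate items :=
    (PySem.List.mem_enumerate_iff items 0 _).mpr ⟨a, han, rfl⟩
  rw [pv_flatMap_single hx (pv_nodup_enumerate items) ?hzero]
  case hzero =>
    intro y hy hne
    obtain ⟨k, hk, rfl⟩ := (PySem.List.mem_enumerate_iff items 0 y).mp hy
    have hka : k ≠ a := fun h => hne (by subst h; rfl)
    have hfst : (items[k]'hk).1 ≠ (items[a]'han).1 := by
      intro h
      have h1 : (items.map (·.1))[k]'(by simpa using hk) = (items.map (·.1))[a]'(by simpa using han) := by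
        simpa using h
      exact hka ((hnd'.getElem_inj_iff).mp h1)
    refine List.flatMap_eq_nil_iff.mpr ?_
    intro e _
    rw [List.filter_map]
    refine congrArg _ (List.filter_eq_nil_iff.mpr ?_)
    intro j _
    simp [beq_iff_eq, Prod.ext_iff, hfst]
  -- surviving piece: the a-th client's entities, filtered to those the b-th client owns
  have hin : ∀ e : Int,
      (((PySem.List.enumerate items).flatMap (fun p' => if e ∈ p'.2.2 then [p'.1] else [])).map
        (fun j => (((((0 : Int) + (a : Int), items[a]'han), e) : (Int × Int × List Int) × Int), j))).filter
        (fun r => (((r.1.1.2.1, (PySem.List.pyGetD items r.2 (0, [])).1) : Int × Int)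
            == ((items[a]'han).1, (items[b]'hbn).1)) && decide (r.1.1.1 < r.2))
      = if e ∈ (items[b]'hbn).2
          then [(((((0 : Int) + (a : Int), items[a]'han), e) : (Int × Int × List Int) × Int), (b : Int))]
          else [] := by
    intro e
    rw [List.filter_map]
    have hflt : List.filter ((fun r => (((r.1.1.2.1, (PySem.List.pyGetD items r.2 (0, [])).1) : Int × Int)
            == ((items[a]'han).1, (items[b]'hbn).1)) && decide (r.1.1.1 < r.2)) ∘
          (fun j => (((((0 : Int) + (a : Int), items[a]'han), e) : (Int × Int × List Int) × Int), j)))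
        ((PySem.List.enumerate items).flatMap (fun p' => if e ∈ p'.2.2 then [p'.1] else []))
        = List.filter (fun j => j == (b : Int))
            ((PySem.List.enumerate items).flatMap (fun p' => if e ∈ p'.2.2 then [p'.1] else [])) := by
      refine List.filter_congr ?_
      intro j hj
      obtain ⟨m, hm, rfl, hem⟩ := (pv_mem_owners items e j).mp hj
      simp only [Function.comp_def]
      by_cases hmb : m = b
      · subst hmb
        rw [PySem.List.pyGetD_eq_getElem _ _ (by omega) (by omega)]
        simp only [Int.toNat_natCast]
        simp
        omega
      · have hfst : (items[m]'hm).1 ≠ (items[b]'hbn).1 := by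
          intro h
          have h1 : (items.map (·.1))[m]'(by simpa using hm) = (items.map (·.1))[b]'(by simpa using hbn) := by
            simpa using h
          exact hmb ((hnd'.getElem_inj_iff).mp h1)
        rw [PySem.List.pyGetD_eq_getElem _ _ (by omega) (by omega)]
        simp only [Int.toNat_natCast]
        have h1 : (((items[a]'han).1, (items[m]'hm).1)
            == (((items[a]'han).1, (items[b]'hbn).1) : Int × Int)) = false := by
          simp [Prod.ext_iff, hfst]
        have h2 : (((m : Nat) : Int) == ((b : Nat) : Int)) = false := by
          simp; omega
        rw [h1, h2]
        simp
    rw [hflt, pv_filter_nodup_single (pv_nodup_owners items e)]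
    by_cases hb : e ∈ (items[b]'hbn).2
    · rw [if_pos ((pv_mem_owners items e _).mpr ⟨b, hbn, rfl, hb⟩), if_pos hb]
      rfl
    · have hnotmem : ((b : Nat) : Int) ∉ (PySem.List.enumerate items).flatMap
          (fun p' => if e ∈ p'.2.2 then [p'.1] else []) := by
        intro hmem
        obtain ⟨m, hm, hbm, hem⟩ := (pv_mem_owners items e _).mp hmem
        have hmb : m = b := by exact_mod_cast hbm.symm
        exact hb (hmb ▸ hem)
      rw [if_neg hnotmem, if_neg hb]
      rfl
  simp only [hin]
  have hfi := pv_flatMap_if ((items[a]'han).2) (fun e => e ∈ (items[b]'hbn).2)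
      (fun e => (((((0 : Int) + (a : Int), items[a]'han), e) : (Int × Int × List Int) × Int), (b : Int)))
  simp only [] at hfi
  rw [hfi, List.map_map]
  simp [Function.comp_def]

-- the filtered flattened triple loop, read back at one pair key
theorem pv_res_items (items : List (Int × List Int)) (hnd' : (items.map (·.1)).Nodup)
    (hvals' : ∀ p ∈ items, p.2.Nodup) (D0 : PySem.Dict (Int × Int) (List Int))
    (hInit : D0.items = (pvP items.length).map (fun q => (pvKey items q, ([] : List Int)))) :
    (List.foldl
      (fun (acc : PySem.Dict (Int × Int) (List Int)) (r : ((Int × Int × List Int) × Int) × Int) =>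
        acc.modify (r.1.1.2.1, (PySem.List.pyGetD items r.2 (0, [])).1) []
          (fun s => PySem.Set.add s r.1.2))
      D0
      (List.filter (fun (r : ((Int × Int × List Int) × Int) × Int) => decide (r.1.1.1 < r.2))
        (((PySem.List.enumerate items).flatMap (fun p => p.2.2.map (fun e => (p, e)))).flatMap
          (fun q => ((PySem.List.enumerate items).flatMap
              (fun p' => if q.2 ∈ p'.2.2 then [p'.1] else [])).map (fun j => (q, j)))))).items
    = (pvP items.length).map (fun q => (pvKey items q, pvVal items q)) := by
  have hD0keys : D0.keys = (pvP items.length).map (pvKey items) := by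
    show D0.items.map (·.1) = _
    rw [hInit, List.map_map]; rfl
  have hD0nodup : D0.keys.Nodup := by rw [hD0keys]; exact pv_nodup_map_key hnd'
  -- every modified key is already a key of D0
  have hMmem : ∀ r ∈ (List.filter (fun (r : ((Int × Int × List Int) × Int) × Int) => decide (r.1.1.1 < r.2))
        (((PySem.List.enumerate items).flatMap (fun p => p.2.2.map (fun e => (p, e)))).flatMap
          (fun q => ((PySem.List.enumerate items).flatMap
              (fun p' => if q.2 ∈ p'.2.2 then [p'.1] else [])).map (fun j => (q, j))))),
      ((r.1.1.2.1, (PySem.List.pyGetD items r.2 (0, [])).1) : Int × Int) ∈ D0.keys := by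
    intro r hr
    rw [List.mem_filter] at hr
    obtain ⟨hrT, hrlt⟩ := hr
    rw [List.mem_flatMap] at hrT
    obtain ⟨q, hq, hrq⟩ := hrT
    rw [List.mem_map] at hrq
    obtain ⟨j, hj, rfl⟩ := hrq
    rw [List.mem_flatMap] at hq
    obtain ⟨p, hp, hqp⟩ := hq
    rw [List.mem_map] at hqp
    obtain ⟨e, he, rfl⟩ := hqp
    obtain ⟨k, hk, rfl⟩ := (PySem.List.mem_enumerate_iff items 0 p).mp hp
    obtain ⟨m, hm, rfl, hem⟩ := (pv_mem_owners items e j).mp hj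
    simp only [decide_eq_true_eq] at hrlt
    rw [hD0keys]
    rw [List.mem_map]
    refine ⟨((k : Int), (m : Int)), pv_mem_pvP.mpr ⟨by omega, by simp at hrlt ⊢; omega, by omega⟩, ?_⟩
    unfold pvKey
    rw [PySem.List.pyGetD_eq_getElem _ _ (by omega) (by push_cast; omega),
        PySem.List.pyGetD_eq_getElem _ _ (by omega) (by push_cast; omega)]
    simp
  have hreskeys : (List.foldl
      (fun (acc : PySem.Dict (Int × Int) (List Int)) (r : ((Int × Int × List Int) × Int) × Int) =>
        acc.modify (r.1.1.2.1, (PySem.List.pyGetD items r.2 (0, [])).1) []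
          (fun s => PySem.Set.add s r.1.2))
      D0
      (List.filter (fun (r : ((Int × Int × List Int) × Int) × Int) => decide (r.1.1.1 < r.2))
        (((PySem.List.enumerate items).flatMap (fun p => p.2.2.map (fun e => (p, e)))).flatMap
          (fun q => ((PySem.List.enumerate items).flatMap
              (fun p' => if q.2 ∈ p'.2.2 then [p'.1] else [])).map (fun j => (q, j)))))).keys
      = D0.keys := by
    rw [PySem.Dict.keys_foldl_modify_key _
      (fun (r : ((Int × Int × List Int) × Int) × Int) =>
        ((r.1.1.2.1, (PySem.List.pyGetD items r.2 (0, [])).1) : Int × Int)) []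
      (fun _ r => fun s => PySem.Set.add s r.1.2) D0]
    rw [PySem.Set.update_eq_append_filter]
    have : (List.filter (fun y => !PySem.Set.contains D0.keys y)
        (PySem.Set.ofList (List.map (fun (r : ((Int × Int × List Int) × Int) × Int) =>
          ((r.1.1.2.1, (PySem.List.pyGetD items r.2 (0, [])).1) : Int × Int))
          (List.filter (fun (r : ((Int × Int × List Int) × Int) × Int) => decide (r.1.1.1 < r.2))
        (((PySem.List.enumerate items).flatMap (fun p => p.2.2.map (fun e => (p, e)))).flatMap
          (fun q => ((PySem.List.enumerate items).flatMap
              (fun p' => if q.2 ∈ p'.2.2 then [p'.1] else [])).map (fun j => (q, j)))))))) = [] := by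
      refine List.filter_eq_nil_iff.mpr ?_
      intro y hy
      rw [PySem.Set.mem_ofList, List.mem_map] at hy
      obtain ⟨r, hr, rfl⟩ := hy
      have := hMmem r hr
      simp [this]
    rw [this, List.append_nil]
  rw [PySem.Dict.items_eq_map_keys _ (by rw [hreskeys]; exact hD0nodup) ([] : List Int)]
  rw [hreskeys, hD0keys, List.map_map]
  refine List.map_congr_left ?_
  intro q hq
  have hbounds := pv_mem_pvP.mp hq
  obtain ⟨q1, q2⟩ := q
  obtain ⟨a, rfl⟩ : ∃ a : Nat, q1 = (a : Int) := ⟨q1.toNat, by omega⟩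
  obtain ⟨b, rfl⟩ : ∃ b : Nat, q2 = (b : Int) := ⟨q2.toNat, by omega⟩
  obtain ⟨-, hab', hbn'⟩ := hbounds
  simp only [] at hab' hbn'
  have hab : a < b := by exact_mod_cast hab'
  have hbn : b < items.length := by exact_mod_cast hbn'
  simp only [Function.comp_def]
  rw [Prod.mk.injEq]
  refine ⟨rfl, ?_⟩
  rw [pv_getD_foldl_modify_add _
    (fun (r : ((Int × Int × List Int) × Int) × Int) =>
      ((r.1.1.2.1, (PySem.List.pyGetD items r.2 (0, [])).1) : Int × Int))
    (fun r => r.1.2) D0 (pvKey items ((a : Int), (b : Int)))]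
  have hD0getD : D0.getD (pvKey items ((a : Int), (b : Int))) [] = [] := by
    refine PySem.Dict.getD_of_mem_items D0 ?_ hD0nodup []
    rw [hInit]
    exact List.mem_map_of_mem hq
  rw [hD0getD, pv_M_filter items hnd' hab hbn]
  rw [← PySem.Set.ofList_eq_foldl,
    PySem.Set.ofList_eq_self_of_nodup _ ((hvals' _ (List.getElem_mem _)).filter _)]
  unfold pvVal
  rw [PySem.List.pyGetD_eq_getElem _ _ (by omega) (by push_cast; omega),
      PySem.List.pyGetD_eq_getElem _ _ (by omega) (by push_cast; omega)]
  simp only [Int.toNat_natCast]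
  show _ = PySem.Set.inter _ _
  unfold PySem.Set.inter
  refine List.filter_congr ?_
  intro x _
  simp

-- B's loops produce the same items list
theorem pv_B_items (d : PySem.Dict Int (List Int)) (hnd : d.keys.Nodup)
    (hvals : ∀ p ∈ d.items, p.2.Nodup) :
    (List.foldl
      (fun acc (p : Int × Int × List Int) =>
        List.foldl
          (fun acc e =>
            List.foldl
              (fun (acc : PySem.Dict (Int × Int) (List Int)) j =>
                if p.1 < j then
                  acc.modify (p.2.1, (PySem.List.pyGetD d.items j (0, [])).1) []
                    (fun s => PySem.Set.add s e)
                else acc)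
              acc
              ((List.foldl
                  (fun ow (p : Int × Int × List Int) =>
                    List.foldl (fun (ow : PySem.Dict Int (List Int)) e =>
                      ow.modify e [] (fun l => l ++ [p.1])) ow p.2.2)
                  PySem.Dict.empty (PySem.List.enumerate d.items)).getD e []))
          acc p.2.2)
      (List.foldl
        (fun acc i =>
          List.foldl
            (fun (acc : PySem.Dict (Int × Int) (List Int)) j =>
              acc.insert ((PySem.List.pyGetD d.items i (0, [])).1,
                (PySem.List.pyGetD d.items j (0, [])).1) [])
            acc (PySem.List.pyRange (i + 1) (d.items.length : Int)))
        PySem.Dict.empty (PySem.List.pyRange 0 (d.items.length : Int)))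
      (PySem.List.enumerate d.items)).items
    = (pvP d.items.length).map (fun q => (pvKey d.items q, pvVal d.items q)) := by
  have hnd' : (d.items.map (·.1)).Nodup := by simpa [PySem.Dict.keys] using hnd
  simp only [pv_owners_getD d.items hvals]
  rw [pv_foldl_flatten (PySem.List.enumerate d.items) (fun p => p.2.2)
      (fun (acc : PySem.Dict (Int × Int) (List Int)) (p : Int × Int × List Int) e =>
        List.foldl
          (fun acc j =>
            if p.1 < j then
              acc.modify (p.2.1, (PySem.List.pyGetD d.items j (0, [])).1) []
                (fun s => PySem.Set.add s e)
            else acc)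
          acc
          ((PySem.List.enumerate d.items).flatMap (fun p' => if e ∈ p'.2.2 then [p'.1] else [])))
      (List.foldl
        (fun acc i =>
          List.foldl
            (fun (acc : PySem.Dict (Int × Int) (List Int)) j =>
              acc.insert ((PySem.List.pyGetD d.items i (0, [])).1,
                (PySem.List.pyGetD d.items j (0, [])).1) [])
            acc (PySem.List.pyRange (i + 1) (d.items.length : Int)))
        PySem.Dict.empty (PySem.List.pyRange 0 (d.items.length : Int)))]
  rw [pv_foldl_flatten
      ((PySem.List.enumerate d.items).flatMap (fun p => p.2.2.map (fun e => (p, e))))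
      (fun q => (PySem.List.enumerate d.items).flatMap (fun p' => if q.2 ∈ p'.2.2 then [p'.1] else []))
      (fun (acc : PySem.Dict (Int × Int) (List Int)) (q : (Int × Int × List Int) × Int) j =>
        if q.1.1 < j then
          acc.modify (q.1.2.1, (PySem.List.pyGetD d.items j (0, [])).1) []
            (fun s => PySem.Set.add s q.2)
        else acc)
      (List.foldl
        (fun acc i =>
          List.foldl
            (fun (acc : PySem.Dict (Int × Int) (List Int)) j =>
              acc.insert ((PySem.List.pyGetD d.items i (0, [])).1,
                (PySem.List.pyGetD d.items j (0, [])).1) [])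
            acc (PySem.List.pyRange (i + 1) (d.items.length : Int)))
        PySem.Dict.empty (PySem.List.pyRange 0 (d.items.length : Int)))]
  rw [PySem.List.foldl_ite_eq_foldl_filter
      (fun (r : ((Int × Int × List Int) × Int) × Int) => r.1.1.1 < r.2)
      (fun (acc : PySem.Dict (Int × Int) (List Int)) r =>
        acc.modify (r.1.1.2.1, (PySem.List.pyGetD d.items r.2 (0, [])).1) []
          (fun s => PySem.Set.add s r.1.2))]
  exact pv_res_items d.items hnd' hvals _ (pv_init_items d.items hnd')

-- ===== VERDICT (by name: the statement is the Claim_ definition above) =====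
theorem find_common_entities_spec : Claim_equal_find_common_entities := by
  intro ce _ hpre
  unfold Spec_find_common_entities find_common_entities find_common_entities_alt
  set d := PySem.Dict.ofList ce with hd
  have hnd : d.keys.Nodup := PySem.Dict.nodup_keys_ofList ce
  have hvals : ∀ p ∈ d.items, p.2.Nodup := fun p hp => hpre p (pv_mem_items_ofList hp)
  simp only []
  rw [pv_A_items d hnd, pv_B_items d hnd hvals]
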